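-- pv_equiv track=rewrite | github.com/SergeLeon/KATK_Bot | parsers/xlsx_parser.py | _extract_timetables_by_weekdays
-- ===== SOURCE A (Python) =====
-- def _find_weekdays_slices(weekdays: list[str]) -> list:
--     last_weekday = ""
--     last_empty_cell = 0
--     last_weekday_cell_num = 0
--
--     slices = []
--     for weekday_cell_num, weekday in enumerate(weekdays, 1):
--         if not weekday:
--             continue
--         if weekday_cell_num != 1:
--             last_empty_cell = weekday_cell_num - 1
--             slices.append([last_weekday, last_weekday_cell_num, last_empty_cell])
--
--         last_weekday = weekday
--         last_weekday_cell_num = weekday_cell_num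
--
--     slices.append((last_weekday, last_weekday_cell_num, len(weekdays)))
--
--     return slices
--
-- def _extract_timetables_by_weekdays(table):
--     weekdays = table[0][1:]
--     timestamps = table[1]
--
--     weekdays_slices = _find_weekdays_slices(weekdays)
--
--     timetables_by_weekdays = {}
--     for weekday, _, _ in weekdays_slices:
--         timetables_by_weekdays[weekday] = {}
--
--     for num, row in enumerate(table[2:]):
--         group_name = row[0].replace(" ", "-").replace("--", "-")
--         for weekday, slice_start, slice_stop in weekdays_slices:
--             timetables_by_weekdays[weekday][group_name] = (
--                 timestamps[slice_start:slice_stop+1], row[slice_start:slice_stop+1])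
--
--     return timetables_by_weekdays
-- ===== SOURCE B (Python) =====
-- def _find_slices(weekdays):
--     positions = [(i, wd) for i, wd in enumerate(weekdays, 1) if wd]
--     if not positions:
--         return [("", 0, len(weekdays))]
--     head = [("", 0, positions[0][0] - 1)] if positions[0][0] != 1 else []
--     mids = [(wd, p, q - 1) for (p, wd), (q, _) in zip(positions, positions[1:])]
--     last_p, last_wd = positions[-1]
--     return head + mids + [(last_wd, last_p, len(weekdays))]
--
--
-- def _extract_timetables_by_weekdays(table):
--     weekdays = table[0][1:]
--     timestamps = table[1]
--     rows = table[2:]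
--     return {
--         wd: {
--             row[0].replace(" ", "-").replace("--", "-"):
--                 (timestamps[start:stop + 1], row[start:stop + 1])
--             for row in rows
--         }
--         for wd, start, stop in _find_slices(weekdays)
--     }
-- ===== Notes on version B (the rewrite author's own statement) =====
-- stated objective: alternative
-- what changed: The stateful last-weekday scan is replaced by filtering the enumerated header row and pairing consecutive non-empty positions with zip, and the nested dict is built with the loops swapped as one dict comprehension per weekday slice, removing A's separate key-initialisation pass.
import Mathlib
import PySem

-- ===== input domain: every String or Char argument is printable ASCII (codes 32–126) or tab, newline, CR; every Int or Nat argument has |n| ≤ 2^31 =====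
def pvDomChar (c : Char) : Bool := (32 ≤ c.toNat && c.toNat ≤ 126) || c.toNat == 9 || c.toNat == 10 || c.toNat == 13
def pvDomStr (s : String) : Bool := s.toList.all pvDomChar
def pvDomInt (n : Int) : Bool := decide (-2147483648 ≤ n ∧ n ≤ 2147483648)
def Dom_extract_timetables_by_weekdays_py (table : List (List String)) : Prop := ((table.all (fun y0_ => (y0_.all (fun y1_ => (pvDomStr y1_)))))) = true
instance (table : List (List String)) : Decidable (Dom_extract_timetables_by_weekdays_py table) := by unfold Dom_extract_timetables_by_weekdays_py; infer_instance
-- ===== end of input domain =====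

-- B replaces A's stateful weekday scan by filtering the enumerated header and pairing consecutive
-- positions with zip, and builds the nested dict with the loops swapped (one dict per weekday slice,
-- no separate key-initialisation pass); objective: alternative decomposition, same asymptotic cost.

-- ===== PORT A =====
-- _find_weekdays_slices: state = (last_weekday, last_weekday_cell_num, slices); the local
-- last_empty_cell is only ever read in the append right after it is set, so it is inlined.
def pvFindWeekdaysSlicesA (weekdays : List String) : List (String × Int × Int) :=
  let st :=
    (PySem.List.enumerate weekdays 1).foldl
      (fun (st : String × Int × List (String × Int × Int)) p =>
        if p.2 = "" then st
        else
          (p.2, p.1,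
            if p.1 ≠ 1 then st.2.2 ++ [(st.1, st.2.1, p.1 - 1)] else st.2.2))
      ("", 0, [])
  st.2.2 ++ [(st.1, st.2.1, (weekdays.length : Int))]

-- table[0], table[1], row[0] are ported with pyGetD: Pre_ guarantees the index is in range
-- (Python raises IndexError exactly where it is not; those inputs are outside Pre_).
-- timetables[weekday][group] = v is Dict.modify at weekday; the key always exists because the
-- first loop inserted every weekday of the same slices list, so modify is exact here.
def extract_timetables_by_weekdays_py (table : List (List String)) : List (String × List (String × List String × List String)) :=
  let weekdays := PySem.List.slice (PySem.List.pyGetD table 0 []) (some 1) none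
  let timestamps := PySem.List.pyGetD table 1 []
  let ws := pvFindWeekdaysSlicesA weekdays
  let d0 : PySem.Dict String (PySem.Dict String (List String × List String)) :=
    ws.foldl (fun d s => d.insert s.1 PySem.Dict.empty) PySem.Dict.empty
  let d :=
    (PySem.List.enumerate (PySem.List.slice table (some 2) none)).foldl
      (fun d nr =>
        let group := PySem.Str.replace (PySem.Str.replace (PySem.List.pyGetD nr.2 0 "") " " "-") "--" "-"
        ws.foldl
          (fun d s =>
            d.modify s.1 PySem.Dict.empty
              (fun inner =>
                inner.insert group
                  (PySem.List.slice timestamps (some s.2.1) (some (s.2.2 + 1)),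
                   PySem.List.slice nr.2 (some s.2.1) (some (s.2.2 + 1)))))
          d)
      d0
  d.items.map (fun p => (p.1, p.2.items))

-- ===== PORT B =====
-- positions[0] / positions[-1] are ported with pyGetD (the branch guarantees positions ≠ []).
def pvFindSlicesB (weekdays : List String) : List (String × Int × Int) :=
  let positions := (PySem.List.enumerate weekdays 1).filter (fun p => p.2 ≠ "")
  if positions.isEmpty then [("", 0, (weekdays.length : Int))]
  else
    let first := PySem.List.pyGetD positions 0 (0, "")
    let head := if first.1 ≠ 1 then [("", (0 : Int), first.1 - 1)] else []
    let mids := (positions.zip (PySem.List.slice positions (some 1) none)).map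
        (fun q => (q.1.2, q.1.1, q.2.1 - 1))
    let last := PySem.List.pyGetD positions (-1) (0, "")
    head ++ mids ++ [(last.2, last.1, (weekdays.length : Int))]

def extract_timetables_by_weekdays_py_alt (table : List (List String)) : List (String × List (String × List String × List String)) :=
  let weekdays := PySem.List.slice (PySem.List.pyGetD table 0 []) (some 1) none
  let timestamps := PySem.List.pyGetD table 1 []
  let rows := PySem.List.slice table (some 2) none
  let d : PySem.Dict String (PySem.Dict String (List String × List String)) :=
    (pvFindSlicesB weekdays).foldl
      (fun d s =>
        d.insert s.1
          (rows.foldl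
            (fun m row =>
              m.insert (PySem.Str.replace (PySem.Str.replace (PySem.List.pyGetD row 0 "") " " "-") "--" "-")
                (PySem.List.slice timestamps (some s.2.1) (some (s.2.2 + 1)),
                 PySem.List.slice row (some s.2.1) (some (s.2.2 + 1))))
            PySem.Dict.empty))
      PySem.Dict.empty
  d.items.map (fun p => (p.1, p.2.items))

-- ===== PRECONDITION & SPEC =====
-- Pre_ excludes exactly the inputs where A raises IndexError: fewer than two rows
-- (table[0] / table[1]) or an empty row after the first two (row[0]).
def Pre_extract_timetables_by_weekdays_py (table : List (List String)) : Prop :=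
  2 ≤ table.length ∧ ∀ row ∈ table.drop 2, row ≠ []
instance (table : List (List String)) : Decidable (Pre_extract_timetables_by_weekdays_py table) := by unfold Pre_extract_timetables_by_weekdays_py; infer_instance

def pvWitness_extract_timetables_by_weekdays_py : List (List String) :=
  [["", "Mon", "", "Tue"], ["h", "t1", "t2", "t3", "t4"], ["g 1", "a", "b", "c", "d"], ["g  2", "e", "f", "g", "h"]]

def Spec_extract_timetables_by_weekdays_py (table : List (List String)) (out : List (String × List (String × List String × List String))) : Prop := out = extract_timetables_by_weekdays_py_alt table
instance (table : List (List String)) (out : List (String × List (String × List String × List String))) : Decidable (Spec_extract_timetables_by_weekdays_py table out) := by unfold Spec_extract_timetables_by_weekdays_py; infer_instance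

-- ===== CLAIM (what is proved, stated in full; the proofs are below) =====
def Claim_equal_extract_timetables_by_weekdays_py : Prop := ∀ (table : List (List String)), Dom_extract_timetables_by_weekdays_py table → Pre_extract_timetables_by_weekdays_py table → Spec_extract_timetables_by_weekdays_py table (extract_timetables_by_weekdays_py table)

-- ===== LEMMAS AND PROOFS =====

-- Shape of A's scan state after consuming an enumerated suffix, phrased over the filtered positions.
def pvBShape (P : List (Int × String)) (st : String × Int × List (String × Int × Int)) :
    String × Int × List (String × Int × Int) :=
  match P with
  | [] => st
  | p0 :: ps =>
    ((P.getLastD (0, "")).2, (P.getLastD (0, "")).1,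
      st.2.2 ++ (if p0.1 ≠ 1 then [(st.1, st.2.1, p0.1 - 1)] else [])
        ++ ((p0 :: ps).zip ps).map (fun q => (q.1.2, q.1.1, q.2.1 - 1)))

theorem pv_enum_fst_ge {t : List String} {n : Int} {p : Int × String}
    (hp : p ∈ PySem.List.enumerate t n) : n ≤ p.1 := by
  induction t generalizing n with
  | nil => simp [PySem.List.enumerate] at hp
  | cons x xs ih =>
    simp only [PySem.List.enumerate, List.mem_cons] at hp
    rcases hp with h | h
    · simp [h]
    · have := ih h; omega

theorem pv_foldA_eq (t : List String) (n : Int) (hn : 1 ≤ n)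
    (st : String × Int × List (String × Int × Int)) :
    (PySem.List.enumerate t n).foldl
      (fun (st : String × Int × List (String × Int × Int)) p =>
        if p.2 = "" then st
        else
          (p.2, p.1,
            if p.1 ≠ 1 then st.2.2 ++ [(st.1, st.2.1, p.1 - 1)] else st.2.2))
      st
    = pvBShape ((PySem.List.enumerate t n).filter (fun p => p.2 ≠ "")) st := by
  induction t generalizing n st with
  | nil => rfl
  | cons x xs ih =>
    simp only [PySem.List.enumerate, List.foldl_cons, List.filter_cons]
    by_cases hx : x = ""
    · subst hx
      simp only [show (decide (("" : String) ≠ "")) = false by simp,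
        Bool.false_eq_true, if_false]
      exact ih (n + 1) (by omega) st
    · have hd : (decide (x ≠ "")) = true := by simp [hx]
      rw [if_neg hx, hd, if_pos rfl]
      rw [ih (n + 1) (by omega)]
      cases hf : (PySem.List.enumerate xs (n + 1)).filter (fun p => p.2 ≠ "") with
      | nil =>
        simp only [pvBShape]
        split_ifs <;> simp
      | cons q qs =>
        have hq : n + 1 ≤ q.1 :=
          pv_enum_fst_ge (List.mem_filter.mp (hf ▸ List.mem_cons_self ..)).1
        simp only [pvBShape]
        have hq1 : q.1 ≠ 1 := by omega
        simp only [if_pos hq1, ne_eq]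
        simp only [List.getLastD_cons, List.zip]
        split_ifs <;> simp

theorem pv_pyGetD_neg_one {α : Type} (l : List α) (d : α) (h : l ≠ []) :
    PySem.List.pyGetD l (-1) d = l.getLastD d := by
  have hn : 0 < l.length := List.length_pos_iff.mpr h
  simp only [PySem.List.pyGetD, PySem.List.pyGet?, PySem.List.pyIdx?,
    if_neg (by norm_num : ¬ (0:Int) ≤ -1), if_pos (by omega : -(l.length:Int) ≤ -1)]
  simp [List.getLastD_eq_getLast?, List.getLast?_eq_getElem?]

theorem pv_slices_eq (w : List String) : pvFindWeekdaysSlicesA w = pvFindSlicesB w := by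
  simp only [pvFindWeekdaysSlicesA, pvFindSlicesB]
  rw [pv_foldA_eq w 1 le_rfl]
  cases hf : (PySem.List.enumerate w 1).filter (fun p => p.2 ≠ "") with
  | nil => simp [pvBShape]
  | cons q qs =>
    rw [pv_pyGetD_neg_one _ _ (by simp)]
    rw [PySem.List.slice_from _ (by norm_num)]
    simp only [pvBShape, List.isEmpty_cons, Bool.false_eq_true, if_false]
    simp [PySem.List.pyGetD, PySem.List.pyGet?, PySem.List.pyIdx?, List.zip]

-- fold over an enumerated list whose body only reads the element equals the fold over the list
theorem pv_foldl_enumerate {α β : Type} (l : List α) (n : Int) (a : β) (f : β → α → β) :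
    (PySem.List.enumerate l n).foldl (fun acc p => f acc p.2) a = l.foldl f a := by
  induction l generalizing n a with
  | nil => rfl
  | cons x xs ih => simp only [PySem.List.enumerate, List.foldl_cons]; exact ih _ _

theorem pv_set_update_id {α : Type} [BEq α] [LawfulBEq α]
    (s : PySem.Set α) (xs : List α) (h : ∀ x ∈ xs, x ∈ s) : PySem.Set.update s xs = s := by
  induction xs generalizing s with
  | nil => rfl
  | cons x t ih =>
    have hx : x ∈ s := h x (by simp)
    show PySem.Set.update (PySem.Set.add s x) t = s
    rw [show PySem.Set.add s x = s by simp [PySem.Set.add, PySem.Set.contains, hx]]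
    exact ih s (fun y hy => h y (by simp [hy]))

-- repeated inserts at one key collapse to a single insert with the last value
theorem pv_foldl_insert_last {κ ν σ : Type} [BEq κ] [LawfulBEq κ] [Inhabited σ]
    (T : List σ) (hT : T ≠ []) (key : κ) (val : σ → ν) (m : PySem.Dict κ ν) :
    T.foldl (fun m s => m.insert key (val s)) m = m.insert key (val (T.getLastD default)) := by
  induction T generalizing m with
  | nil => exact absurd rfl hT
  | cons x xs ih =>
    cases xs with
    | nil => rfl
    | cons y ys =>
      rw [List.foldl_cons, ih (by simp) (m.insert key (val x))]
      simp [PySem.Dict.insert_insert_self, List.getLastD]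

-- reading one key through a fold of modifies keeps only the matching steps
theorem pv_getD_foldl_modify {κ ν σ : Type} [BEq κ] [LawfulBEq κ] [DecidableEq κ]
    (S : List σ) (k : σ → κ) (F : σ → ν → ν) (d : PySem.Dict κ ν) (dflt : ν) (w : κ) :
    (S.foldl (fun d s => d.modify (k s) dflt (F s)) d).getD w dflt
      = (S.filter (fun s => k s == w)).foldl (fun m s => F s m) (d.getD w dflt) := by
  induction S generalizing d with
  | nil => rfl
  | cons x xs ih =>
    simp only [List.foldl_cons, List.filter_cons]
    rw [ih]
    by_cases h : k x = w
    · simp [h]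
    · simp [h, Ne.symm h, PySem.Dict.getD_modify]

-- reading one key through a fold of inserts keeps the last matching value
theorem pv_getD_foldl_insert {κ ν σ : Type} [BEq κ] [LawfulBEq κ] [DecidableEq κ] [Inhabited σ]
    (S : List σ) (k : σ → κ) (G : σ → ν) (d : PySem.Dict κ ν) (dflt : ν) (w : κ) :
    (S.foldl (fun d s => d.insert (k s) (G s)) d).getD w dflt
      = (match S.filter (fun s => k s == w) with
         | [] => d.getD w dflt
         | T => G (T.getLastD default)) := by
  induction S generalizing d with
  | nil => rfl
  | cons x xs ih =>
    rw [List.foldl_cons, ih, List.filter_cons]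
    by_cases h : k x = w
    · simp only [h, beq_self_eq_true, if_pos]
      cases hf : xs.filter (fun s => k s == w) with
      | nil => simp
      | cons a b => simp
    · simp [h, PySem.Dict.getD_insert, Ne.symm h]

-- keys are unchanged by the row loop of modifies (every slice key is already present)
theorem pv_rows_fold_keys {κ ν ρ σ : Type} [BEq κ] [LawfulBEq κ]
    (S : List σ) (k : σ → κ) (F : ρ → σ → ν → ν) (d0v : ν) :
    ∀ (rows : List ρ) (d : PySem.Dict κ ν), (∀ s ∈ S, k s ∈ d.keys) →
      (rows.foldl (fun d r => S.foldl (fun d s => d.modify (k s) d0v (F r s)) d) d).keys = d.keys := by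
  intro rows
  induction rows with
  | nil => intro d _; rfl
  | cons r rest ih =>
    intro d hmem
    rw [List.foldl_cons]
    have hk : (S.foldl (fun d s => d.modify (k s) d0v (F r s)) d).keys = d.keys := by
      rw [PySem.Dict.keys_foldl_modify_key S k d0v (fun d s => F r s) d]
      apply pv_set_update_id
      intro x hx
      obtain ⟨s, hs, rfl⟩ := List.mem_map.mp hx
      exact hmem s hs
    rw [ih _ (by rw [hk]; exact hmem), hk]

theorem pv_rows_fold_getD {κ ν ρ σ : Type} [BEq κ] [LawfulBEq κ] [DecidableEq κ]
    (S : List σ) (k : σ → κ) (F : ρ → σ → ν → ν) (d0v : ν) (w : κ) :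
    ∀ (rows : List ρ) (d : PySem.Dict κ ν),
      (rows.foldl (fun d r => S.foldl (fun d s => d.modify (k s) d0v (F r s)) d) d).getD w d0v
        = rows.foldl (fun m r => (S.filter (fun s => k s == w)).foldl (fun m s => F r s m) m) (d.getD w d0v) := by
  intro rows
  induction rows with
  | nil => intro d; rfl
  | cons r rest ih =>
    intro d
    rw [List.foldl_cons, List.foldl_cons, ih, pv_getD_foldl_modify]

-- the nested init-then-modify loops of A equal B's swapped insert loops
theorem pv_main {κ ν ρ σ : Type} [BEq κ] [LawfulBEq κ] [DecidableEq κ] [Inhabited σ]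
    (S : List σ) (k : σ → κ) (rows : List ρ) (g : ρ → κ) (v : σ → ρ → ν) :
    rows.foldl
      (fun d r => S.foldl (fun d s => d.modify (k s) PySem.Dict.empty
          (fun inner => inner.insert (g r) (v s r))) d)
      (S.foldl (fun d s => d.insert (k s) (PySem.Dict.empty : PySem.Dict κ ν)) PySem.Dict.empty)
    = S.foldl
        (fun d s => d.insert (k s)
          (rows.foldl (fun m r => m.insert (g r) (v s r)) PySem.Dict.empty))
        PySem.Dict.empty := by
  have hK0 : (S.foldl (fun d s => d.insert (k s) (PySem.Dict.empty : PySem.Dict κ ν)) PySem.Dict.empty).keys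
      = PySem.Set.update (PySem.Dict.empty : PySem.Dict κ (PySem.Dict κ ν)).keys (S.map k) :=
    PySem.Dict.keys_foldl_insert_key S k (fun _ _ => PySem.Dict.empty) PySem.Dict.empty
  have hmem0 : ∀ s ∈ S, k s ∈ (S.foldl (fun d s => d.insert (k s) (PySem.Dict.empty : PySem.Dict κ ν)) PySem.Dict.empty).keys := by
    intro s hs
    rw [hK0]
    simp only [PySem.Dict.keys_empty]
    show k s ∈ PySem.Set.ofList (S.map k)
    rw [PySem.Set.mem_ofList]
    exact List.mem_map.mpr ⟨s, hs, rfl⟩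
  have hkeysA := pv_rows_fold_keys S k (fun r s inner => inner.insert (g r) (v s r)) PySem.Dict.empty rows _ hmem0
  have hkeysB : (S.foldl (fun d s => d.insert (k s)
        (rows.foldl (fun m r => m.insert (g r) (v s r)) PySem.Dict.empty)) PySem.Dict.empty).keys
      = PySem.Set.update (PySem.Dict.empty : PySem.Dict κ (PySem.Dict κ ν)).keys (S.map k) :=
    PySem.Dict.keys_foldl_insert_key S k _ PySem.Dict.empty
  have hnodA : (rows.foldl
      (fun d r => S.foldl (fun d s => d.modify (k s) PySem.Dict.empty
          (fun inner => inner.insert (g r) (v s r))) d)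
      (S.foldl (fun d s => d.insert (k s) (PySem.Dict.empty : PySem.Dict κ ν)) PySem.Dict.empty)).keys.Nodup := by
    rw [hkeysA]
    exact PySem.Dict.nodup_keys_foldl_insert_key S k _ _ (by simp [PySem.Dict.keys_empty])
  have hnodB := PySem.Dict.nodup_keys_foldl_insert_key S k
    (fun _ s => rows.foldl (fun m r => m.insert (g r) (v s r)) PySem.Dict.empty)
    PySem.Dict.empty (by simp [PySem.Dict.keys_empty])
  apply PySem.Dict.ext
  rw [PySem.Dict.items_eq_map_keys _ hnodA PySem.Dict.empty,
      PySem.Dict.items_eq_map_keys _ hnodB PySem.Dict.empty,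
      hkeysA, hK0, hkeysB]
  apply List.map_congr_left
  intro w hw
  have hgA := pv_rows_fold_getD S k (fun r s inner => inner.insert (g r) (v s r)) PySem.Dict.empty w rows
    (S.foldl (fun d s => d.insert (k s) (PySem.Dict.empty : PySem.Dict κ ν)) PySem.Dict.empty)
  have hg0 := pv_getD_foldl_insert S k (fun _ => (PySem.Dict.empty : PySem.Dict κ ν)) PySem.Dict.empty PySem.Dict.empty w
  have hgB := pv_getD_foldl_insert S k
    (fun s => rows.foldl (fun m r => m.insert (g r) (v s r)) PySem.Dict.empty) PySem.Dict.empty PySem.Dict.empty w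
  show (w, _) = (w, _)
  cases hf : S.filter (fun s => k s == w) with
  | nil =>
    rw [hf] at hgA hg0 hgB
    simp only [List.foldl_nil] at hgA
    rw [hgA, hgB, PySem.List.foldl_ignore, hg0, PySem.Dict.getD_empty]
  | cons t0 ts =>
    rw [hf] at hgA hg0 hgB
    rw [hgA, hgB, hg0]
    congr 1
    rw [PySem.List.foldl_congr_mem rows _
      (fun m r => m.insert (g r) (v ((t0 :: ts).getLastD default) r)) _
      (fun m r _ => pv_foldl_insert_last (t0 :: ts) (by simp) (g r) (fun s => v s r) m)]

-- ===== VERDICT (by name: the statement is the Claim_ definition above) =====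
theorem extract_timetables_by_weekdays_py_spec : Claim_equal_extract_timetables_by_weekdays_py := by
  intro table _ _
  show extract_timetables_by_weekdays_py table = extract_timetables_by_weekdays_py_alt table
  simp only [extract_timetables_by_weekdays_py, extract_timetables_by_weekdays_py_alt]
  rw [pv_slices_eq]
  refine congrArg (fun d : PySem.Dict String (PySem.Dict String (List String × List String)) =>
    List.map (fun p => (p.1, p.2.items)) d.items) ?_
  refine Eq.trans (pv_foldl_enumerate (PySem.List.slice table (some 2) none) 0 _
    (fun (d : PySem.Dict String (PySem.Dict String (List String × List String))) row =>
      (pvFindSlicesB (PySem.List.slice (PySem.List.pyGetD table 0 []) (some 1) none)).foldl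
      (fun d s => d.modify s.1 PySem.Dict.empty
        (fun inner => inner.insert
          (PySem.Str.replace (PySem.Str.replace (PySem.List.pyGetD row 0 "") " " "-") "--" "-")
          (PySem.List.slice (PySem.List.pyGetD table 1 []) (some s.2.1) (some (s.2.2 + 1)),
           PySem.List.slice row (some s.2.1) (some (s.2.2 + 1))))) d)) ?_
  exact pv_main (pvFindSlicesB (PySem.List.slice (PySem.List.pyGetD table 0 []) (some 1) none))
    (fun s => s.1) (PySem.List.slice table (some 2) none)
    (fun row => PySem.Str.replace (PySem.Str.replace (PySem.List.pyGetD row 0 "") " " "-") "--" "-")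
    (fun s row =>
      (PySem.List.slice (PySem.List.pyGetD table 1 []) (some s.2.1) (some (s.2.2 + 1)),
       PySem.List.slice row (some s.2.1) (some (s.2.2 + 1))))
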